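-- pv_equiv track=rewrite | github.com/Chung-I/tsm | tsm/util.py | word_lengths_to_char_start_and_ends
-- ===== SOURCE A (Python) =====
-- from typing import List, Dict, Tuple, Iterable, Union
--
-- def word_lengths_to_char_start_and_ends(word_lengths: Iterable[int]) -> List[Tuple[int, int]]:
--     start = 0
--     end = 0
--     start_and_ends = []
--     for word_len in word_lengths:
--         end += word_len
--         start_and_ends.append((start, end))
--         start = end
--     return start_and_ends
-- ===== SOURCE B (Python) =====
-- def word_lengths_to_char_start_and_ends(word_lengths):
--     # Walk the words from the LAST to the FIRST: each word's end is the total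
--     # length remaining, its start is that minus its own length. Built
--     # back-to-front, then reversed.
--     lens = list(word_lengths)
--     end = sum(lens)
--     out = []
--     for w in reversed(lens):
--         out.append((end - w, end))
--         end -= w
--     out.reverse()
--     return out
-- ===== Notes on version B (the rewrite author's own statement) =====
-- stated objective: alternative
-- what changed: Instead of A's forward running-accumulator loop, B computes the total length first and then traverses the words in REVERSE, peeling each word's span off the remaining total and building the result back-to-front before a final reverse.
import Mathlib
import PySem

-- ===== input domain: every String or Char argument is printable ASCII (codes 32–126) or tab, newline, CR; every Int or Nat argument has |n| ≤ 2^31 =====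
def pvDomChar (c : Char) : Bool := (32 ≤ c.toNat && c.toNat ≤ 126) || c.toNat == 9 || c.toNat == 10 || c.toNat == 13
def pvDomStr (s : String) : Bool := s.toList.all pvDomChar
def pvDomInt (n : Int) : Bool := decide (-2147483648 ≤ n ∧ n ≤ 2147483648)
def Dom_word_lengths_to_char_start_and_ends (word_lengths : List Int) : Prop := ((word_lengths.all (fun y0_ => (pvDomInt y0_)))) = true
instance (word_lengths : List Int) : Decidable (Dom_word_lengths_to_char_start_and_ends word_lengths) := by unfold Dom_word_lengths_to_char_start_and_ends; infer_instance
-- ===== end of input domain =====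

-- B replaces A's forward running-accumulator loop by a reverse traversal: total length
-- first, then spans peeled off the remaining total back-to-front, final reverse.

-- ===== PORT A =====
-- state = (start, end, start_and_ends); one forward fold, as in A's loop
def word_lengths_to_char_start_and_ends (word_lengths : List Int) : List (Int × Int) :=
  (word_lengths.foldl
    (fun (st : Int × Int × List (Int × Int)) word_len =>
      let e := st.2.1 + word_len
      (e, e, st.2.2 ++ [(st.1, e)]))
    (0, 0, [])).2.2

-- ===== PORT B =====
-- end := sum(lens); fold over reversed(lens) appending (end - w, end); then reverse
def word_lengths_to_char_start_and_ends_alt (word_lengths : List Int) : List (Int × Int) :=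
  let total := word_lengths.foldl (fun a b => a + b) 0   -- sum(lens)
  ((word_lengths.reverse.foldl
      (fun (st : Int × List (Int × Int)) w =>
        (st.1 - w, st.2 ++ [(st.1 - w, st.1)]))
      (total, [])).2).reverse

-- ===== PRECONDITION & SPEC =====
def Spec_word_lengths_to_char_start_and_ends (word_lengths : List Int) (out : List (Int × Int)) : Prop := out = word_lengths_to_char_start_and_ends_alt word_lengths
instance (word_lengths : List Int) (out : List (Int × Int)) : Decidable (Spec_word_lengths_to_char_start_and_ends word_lengths out) := by unfold Spec_word_lengths_to_char_start_and_ends; infer_instance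

-- ===== CLAIM =====
def Claim_equal_word_lengths_to_char_start_and_ends : Prop := ∀ (word_lengths : List Int), Dom_word_lengths_to_char_start_and_ends word_lengths → Spec_word_lengths_to_char_start_and_ends word_lengths (word_lengths_to_char_start_and_ends word_lengths)

-- ===== LEMMAS AND PROOFS =====
-- reference spec: the span list starting at offset s
def pvSpans (s : Int) : List Int → List (Int × Int)
  | [] => []
  | w :: ws => (s, s + w) :: pvSpans (s + w) ws

theorem foldl_add_eq (wl : List Int) (i : Int) :
    wl.foldl (fun a b => a + b) i = i + wl.sum := by
  induction wl generalizing i with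
  | nil => simp
  | cons w ws ih => simp [List.foldl, ih]; ring

-- A's loop from (s, s, acc) appends pvSpans s wl
theorem foldA_spans (wl : List Int) (s : Int) (acc : List (Int × Int)) :
    (wl.foldl
      (fun (st : Int × Int × List (Int × Int)) word_len =>
        let e := st.2.1 + word_len
        (e, e, st.2.2 ++ [(st.1, e)]))
      (s, s, acc)).2.2 = acc ++ pvSpans s wl := by
  induction wl generalizing s acc with
  | nil => simp [pvSpans]
  | cons w ws ih => simp only [List.foldl, pvSpans]; rw [ih]; simp

-- B's reverse loop from (s + sum wl, acc) ends at (s, acc ++ (pvSpans s wl).reverse)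
theorem foldB_spans (wl : List Int) (s : Int) (acc : List (Int × Int)) :
    wl.reverse.foldl
      (fun (st : Int × List (Int × Int)) w =>
        (st.1 - w, st.2 ++ [(st.1 - w, st.1)]))
      (s + wl.sum, acc) = (s, acc ++ (pvSpans s wl).reverse) := by
  induction wl generalizing s acc with
  | nil => simp [pvSpans]
  | cons w ws ih =>
    simp only [List.reverse_cons, List.foldl_append, List.sum_cons]
    have : s + (w + ws.sum) = (s + w) + ws.sum := by ring
    rw [this, ih (s + w) acc]
    simp [pvSpans]

-- ===== VERDICT =====
theorem word_lengths_to_char_start_and_ends_spec : Claim_equal_word_lengths_to_char_start_and_ends := by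
  intro wl _
  unfold Spec_word_lengths_to_char_start_and_ends word_lengths_to_char_start_and_ends word_lengths_to_char_start_and_ends_alt
  rw [foldA_spans]
  simp only [foldl_add_eq]
  rw [show (0 : Int) + wl.sum = 0 + wl.sum from rfl, foldB_spans]
  simp
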